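-- pv_equiv track=rewrite | github.com/LysanderGG/HackerRank | Algorithms/Implementation/HappyLadybugs.py | are_happy
-- ===== SOURCE A (Python) =====
-- def are_happy(ladybug_str):
--     if len(ladybug_str) < 2:
--         return False
--     if ladybug_str[0] != ladybug_str[1]:
--         return False
--     if ladybug_str[-1] != ladybug_str[-2]:
--         return False
--
--     for i in range(len(ladybug_str) - 2):
--         if ladybug_str[i] != ladybug_str[i + 1] and ladybug_str[i + 1] != ladybug_str[i + 2]:
--             return False
--
--     return True
-- ===== SOURCE B (Python) =====
-- def are_happy(ladybug_str):
--     # happy iff non-trivial and every maximal run of equal characters has length >= 2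
--     if len(ladybug_str) < 2:
--         return False
--     prev = None
--     run = 0
--     for ch in ladybug_str:
--         if ch == prev:
--             run += 1
--         else:
--             if 0 < run < 2:
--                 return False
--             prev, run = ch, 1
--     return run >= 2
-- ===== Notes on version B (the rewrite author's own statement) =====
-- stated objective: alternative
-- what changed: Replaces A's head/tail checks plus interior triple-adjacency index scan with a single run-length pass: happy iff every maximal run of equal characters has length at least 2.
import Mathlib
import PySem

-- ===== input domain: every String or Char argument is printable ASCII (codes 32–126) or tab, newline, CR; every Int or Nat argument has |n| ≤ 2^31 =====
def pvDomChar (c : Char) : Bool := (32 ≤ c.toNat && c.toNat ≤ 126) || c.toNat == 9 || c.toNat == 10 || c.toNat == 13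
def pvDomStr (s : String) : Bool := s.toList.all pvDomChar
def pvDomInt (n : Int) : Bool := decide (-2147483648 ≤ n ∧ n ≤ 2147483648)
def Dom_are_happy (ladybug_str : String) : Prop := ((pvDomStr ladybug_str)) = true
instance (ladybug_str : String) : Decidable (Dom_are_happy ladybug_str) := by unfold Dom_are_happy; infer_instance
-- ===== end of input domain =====

-- B replaces A's head/tail checks plus interior triple-adjacency index scan with a
-- single run-length pass (happy iff every maximal run has length ≥ 2); same O(n) cost.

-- ===== PORT A =====
-- the 'for i in range(len(ladybug_str) - 2)' loop with early return False
def aLoop (l : List Char) (i : Nat) : Bool :=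
  if _h : i < l.length - 2 then
    if PySem.List.pyGet? l (i : Int) ≠ PySem.List.pyGet? l ((i : Int) + 1) ∧
       PySem.List.pyGet? l ((i : Int) + 1) ≠ PySem.List.pyGet? l ((i : Int) + 2) then
      false
    else
      aLoop l (i + 1)
  else
    true
termination_by l.length - i

def are_happy (ladybug_str : String) : Bool :=
  let l := ladybug_str.toList
  if l.length < 2 then false
  else if PySem.List.pyGet? l 0 ≠ PySem.List.pyGet? l 1 then false
  else if PySem.List.pyGet? l (-1) ≠ PySem.List.pyGet? l (-2) then false
  else aLoop l 0

-- ===== PORT B =====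
-- the 'for ch in ladybug_str' run-length loop of Source B (prev : Option Char, run counter)
def bLoop (l : List Char) (prev : Option Char) (run : Nat) : Bool :=
  match l with
  | [] => decide (2 ≤ run)
  | ch :: rest =>
    if some ch = prev then bLoop rest prev (run + 1)
    else if 0 < run ∧ run < 2 then false
    else bLoop rest (some ch) 1

def are_happy_alt (ladybug_str : String) : Bool :=
  let l := ladybug_str.toList
  if l.length < 2 then false
  else bLoop l none 0

-- ===== PRECONDITION & SPEC =====
def Spec_are_happy (ladybug_str : String) (out : Bool) : Prop := out = are_happy_alt ladybug_str
instance (ladybug_str : String) (out : Bool) : Decidable (Spec_are_happy ladybug_str out) := by unfold Spec_are_happy; infer_instance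

-- ===== CLAIM (what is proved, stated in full; the proofs are below) =====
def Claim_equal_are_happy : Prop := ∀ (ladybug_str : String), Dom_are_happy ladybug_str → Spec_are_happy ladybug_str (are_happy ladybug_str)

-- ===== LEMMAS AND PROOFS =====

-- proof-side characterisation of A's interior scan: triple condition along the list
def chain3 : List Char → Bool
  | a :: b :: c :: r => (decide (a = b) || decide (b = c)) && chain3 (b :: c :: r)
  | _ => true

-- proof-side characterisation of A's last-two-equal check
def lastEq : List Char → Bool
  | [] => false
  | [_] => false
  | [a, b] => decide (b = a)
  | _ :: b :: c :: r => lastEq (b :: c :: r)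

lemma chain3_short (l : List Char) (h : l.length ≤ 2) : chain3 l = true := by
  match l with
  | [] => rfl
  | [_] => rfl
  | [_, _] => rfl
  | _ :: _ :: _ :: _ => simp at h

lemma aLoop_eq_chain3 : ∀ (n : Nat) (l : List Char) (i : Nat), l.length - i ≤ n →
    aLoop l i = chain3 (l.drop i) := by
  intro n
  induction n with
  | zero =>
    intro l i h
    have hi : l.length ≤ i := by omega
    rw [aLoop]
    rw [dif_neg (by omega)]
    rw [chain3_short _ (by simp; omega)]
  | succ n ih =>
    intro l i h
    rw [aLoop]
    by_cases hi : i < l.length - 2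
    · rw [dif_pos hi]
      have h0 : i < l.length := by omega
      have h1 : i + 1 < l.length := by omega
      have h2 : i + 2 < l.length := by omega
      have e0 : PySem.List.pyGet? l (i : Int) = some l[i] :=
        PySem.List.pyGet?_ofNat l i h0
      have e1 : PySem.List.pyGet? l ((i : Int) + 1) = some l[i + 1] := by
        have hcast : ((i : Int) + 1) = ((i + 1 : Nat) : Int) := by push_cast; ring
        rw [hcast]; exact PySem.List.pyGet?_ofNat l (i + 1) h1
      have e2 : PySem.List.pyGet? l ((i : Int) + 2) = some l[i + 2] := by
        have hcast : ((i : Int) + 2) = ((i + 2 : Nat) : Int) := by push_cast; ring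
        rw [hcast]; exact PySem.List.pyGet?_ofNat l (i + 2) h2
      rw [e0, e1, e2]
      have hd0 : l.drop i = l[i] :: l.drop (i + 1) := List.drop_eq_getElem_cons h0
      have hd1 : l.drop (i + 1) = l[i + 1] :: l.drop (i + 2) := List.drop_eq_getElem_cons h1
      have hd2 : l.drop (i + 2) = l[i + 2] :: l.drop (i + 3) := List.drop_eq_getElem_cons h2
      by_cases hc : l[i] ≠ l[i + 1] ∧ l[i + 1] ≠ l[i + 2]
      · rw [if_pos (by simpa using hc)]
        rw [hd0, hd1, hd2, chain3]
        simp [hc.1, hc.2]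
      · rw [if_neg (by simpa using hc)]
        rw [ih l (i + 1) (by omega)]
        have hdisj : (decide (l[i] = l[i + 1]) || decide (l[i + 1] = l[i + 2])) = true := by
          rcases Decidable.not_and_iff_not_or_not.mp hc with h | h
          · simp [Decidable.not_not.mp h]
          · simp [Decidable.not_not.mp h]
        rw [hd1, hd2]
        conv_rhs => rw [hd0, hd1, hd2, chain3]
        rw [hdisj, Bool.true_and]
    · rw [dif_neg hi]
      rw [chain3_short _ (by simp; omega)]

lemma lastEq_eq : ∀ (l : List Char), 2 ≤ l.length →
    lastEq l = decide (l.getLast? = l[l.length - 2]?) := by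
  intro l
  induction l with
  | nil => simp
  | cons a t iht =>
    intro hlen
    match t, iht with
    | [b], _ => simp [lastEq, eq_comm]
    | b :: c :: r, iht =>
      have htail := iht (by simp)
      have h1 : (a :: b :: c :: r).getLast? = (b :: c :: r).getLast? := by
        simp [List.getLast?_cons_cons]
      have h2 : (a :: b :: c :: r)[(a :: b :: c :: r).length - 2]?
          = (b :: c :: r)[(b :: c :: r).length - 2]? := by
        have hidx : (a :: b :: c :: r).length - 2 = ((b :: c :: r).length - 2) + 1 := by
          simp
        rw [hidx, List.getElem?_cons_succ]
      rw [lastEq, htail, h1, h2]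

lemma bLoop_run_irrel : ∀ (l : List Char) (c : Char) (k₁ k₂ : Nat),
    2 ≤ k₁ → 2 ≤ k₂ → bLoop l (some c) k₁ = bLoop l (some c) k₂ := by
  intro l
  induction l with
  | nil => intro c k₁ k₂ h1 h2; simp [bLoop, h1, h2]
  | cons d rest ih =>
    intro c k₁ k₂ h1 h2
    by_cases hd : d = c
    · simp only [bLoop, hd]
      exact ih c (k₁ + 1) (k₂ + 1) (by omega) (by omega)
    · have hne : ¬ (some d = some c) := by simp [hd]
      simp only [bLoop, if_neg hne]
      rw [if_neg (by omega), if_neg (by omega)]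

lemma happy_main : ∀ (n : Nat) (rest : List Char), rest.length ≤ n → ∀ (a b : Char),
    (decide (a = b) && lastEq (a :: b :: rest) && chain3 (a :: b :: rest))
      = bLoop (b :: rest) (some a) 1 := by
  intro n
  induction n with
  | zero =>
    intro rest hlen a b
    have hre : rest = [] := by cases rest <;> simp_all
    subst hre
    by_cases hab : b = a
    · simp [bLoop, lastEq, chain3, hab]
    · simp [bLoop, lastEq, chain3, hab, Ne.symm hab]
  | succ n ih =>
    intro rest hlen a b
    match rest with
    | [] =>
      by_cases hab : b = a
      · simp [bLoop, lastEq, chain3, hab]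
      · simp [bLoop, lastEq, chain3, hab, Ne.symm hab]
    | c :: rest' =>
      by_cases hab : a = b
      · obtain rfl : a = b := hab
        rw [bLoop, if_pos rfl]
        by_cases hc : c = a
        · -- run continues
          obtain rfl : a = c := hc.symm
          have hIH := ih rest' (by simp at hlen; omega) a a
          have hstep : bLoop (a :: rest') (some a) 1 = bLoop rest' (some a) 2 := by
            rw [bLoop, if_pos rfl]
          rw [hstep] at hIH
          rw [bLoop, if_pos rfl,
            bLoop_run_irrel rest' a 3 2 (by omega) (by omega), ← hIH]
          simp [lastEq, chain3]
        · -- new run starts at c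
          have hcb : ¬ (some c = some a) := by simp [hc]
          rw [bLoop, if_neg hcb, if_neg (by omega)]
          match rest' with
          | [] =>
            simp [bLoop, lastEq, chain3, hc]
          | d :: r'' =>
            have hIH := ih r'' (by simp at hlen; omega) c d
            rw [← hIH]
            have hbc : ¬ (a = c) := fun h => hc h.symm
            simp only [lastEq, chain3, decide_true, Bool.true_and, hbc,
              decide_false, Bool.false_or]
            cases hcd : decide (c = d) <;>
              cases hle : lastEq (c :: d :: r'') <;>
              cases hch : chain3 (c :: d :: r'') <;> simp
      · have hba : ¬ (some b = some a) := by
          simp only [Option.some.injEq]; exact fun h => hab h.symm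
        rw [bLoop, if_neg hba, if_pos (by omega)]
        simp [hab]

-- ===== VERDICT (by name: the statement is the Claim_ definition above) =====
theorem are_happy_spec : Claim_equal_are_happy := by
  intro s _
  unfold Spec_are_happy are_happy are_happy_alt
  simp only []
  generalize s.toList = l
  by_cases hlen : l.length < 2
  · rw [if_pos hlen, if_pos hlen]
  · rw [if_neg hlen, if_neg hlen]
    match l, hlen with
    | [], hlen => simp at hlen
    | [_], hlen => simp at hlen
    | a :: b :: rest, hlen =>
      -- evaluate the four index accesses
      have e0 : PySem.List.pyGet? (a :: b :: rest) 0 = some a := by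
        simp [PySem.List.pyGet?_zero]
      have e1 : PySem.List.pyGet? (a :: b :: rest) 1 = some b := by
        have h1 : (1 : Nat) < (a :: b :: rest).length := by simp
        have := PySem.List.pyGet?_ofNat (a :: b :: rest) 1 h1
        simpa using this
      have hlen2 : 2 ≤ (a :: b :: rest).length := by simp
      have em1 : PySem.List.pyGet? (a :: b :: rest) (-1) = (a :: b :: rest).getLast? :=
        PySem.List.pyGet?_neg_one _
      have em2 : PySem.List.pyGet? (a :: b :: rest) (-2)
          = (a :: b :: rest)[(a :: b :: rest).length - 2]? := by
        rw [PySem.List.pyGet?_neg_ofNat _ 2 (by omega) (by omega)]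
      rw [e0, e1, em1, em2]
      -- right-hand side: first two loop steps of bLoop
      have hrhs : bLoop (a :: b :: rest) none 0 = bLoop (b :: rest) (some a) 1 := by
        rw [bLoop, if_neg (by simp), if_neg (by omega)]
      rw [hrhs, ← happy_main rest.length rest le_rfl a b, lastEq_eq _ hlen2]
      have hloop : aLoop (a :: b :: rest) 0 = chain3 (a :: b :: rest) := by
        have := aLoop_eq_chain3 (a :: b :: rest).length (a :: b :: rest) 0 (by omega)
        simpa using this
      by_cases h1 : a = b
      · rw [if_neg (by simp [h1])]
        by_cases h2 : (a :: b :: rest).getLast? = (a :: b :: rest)[(a :: b :: rest).length - 2]?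
        · rw [if_neg (fun hcon => hcon h2), hloop, decide_eq_true h1, decide_eq_true h2]
          simp only [Bool.true_and]
        · rw [if_pos h2, decide_eq_false h2]
          simp only [Bool.and_false, Bool.false_and]
      · rw [if_pos (by simp [h1]), decide_eq_false h1]
        simp only [Bool.false_and]
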